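-- pv_equiv track=rewrite | github.com/vinija/LeetCode | 1880-check-if-word-equals-summation-of-two-words/1880. Check if Word Equals Summation of Two Words.py | isSumEqual
-- ===== SOURCE A (Python) =====
-- def isSumEqual(firstWord: str, secondWord: str, targetWord: str) -> bool:
--
--     def wordToNumber(word: str) -> int:
--         number = 0
--         for char in word:
--             number = number * 10 + (ord(char) - ord('a'))
--         return number
--
--     num1 = wordToNumber(firstWord)
--     num2 = wordToNumber(secondWord)
--     targetNum = wordToNumber(targetWord)
--
--     return num1 + num2 == targetNum
-- ===== SOURCE B (Python) =====
-- def isSumEqual(firstWord: str, secondWord: str, targetWord: str) -> bool: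
--     # Single fused column scan: pad all three words to a common width with leading
--     # zeros and Horner-accumulate the per-column DIFFERENCE d1+d2-d3 in one loop;
--     # the three words sum correctly iff the accumulated difference is zero.
--     # (No per-word conversion to a number at all, unlike A.)
--     n = max(len(firstWord), len(secondWord), len(targetWord))
--
--     def digit(word: str, i: int) -> int:
--         j = i - (n - len(word))
--         return ord(word[j]) - 97 if j >= 0 else 0
--
--     acc = 0
--     for i in range(n):
--         acc = acc * 10 + digit(firstWord, i) + digit(secondWord, i) - digit(targetWord, i)
--     return acc == 0
-- ===== Notes on version B (the rewrite author's own statement) =====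
-- stated objective: alternative
-- what changed: Instead of converting each of the three words to a number and comparing sums, B does one fused column scan: all words are left-padded to a common width and a single Horner loop accumulates the per-column difference d1+d2-d3, testing whether the accumulated difference is zero.
import Mathlib
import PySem

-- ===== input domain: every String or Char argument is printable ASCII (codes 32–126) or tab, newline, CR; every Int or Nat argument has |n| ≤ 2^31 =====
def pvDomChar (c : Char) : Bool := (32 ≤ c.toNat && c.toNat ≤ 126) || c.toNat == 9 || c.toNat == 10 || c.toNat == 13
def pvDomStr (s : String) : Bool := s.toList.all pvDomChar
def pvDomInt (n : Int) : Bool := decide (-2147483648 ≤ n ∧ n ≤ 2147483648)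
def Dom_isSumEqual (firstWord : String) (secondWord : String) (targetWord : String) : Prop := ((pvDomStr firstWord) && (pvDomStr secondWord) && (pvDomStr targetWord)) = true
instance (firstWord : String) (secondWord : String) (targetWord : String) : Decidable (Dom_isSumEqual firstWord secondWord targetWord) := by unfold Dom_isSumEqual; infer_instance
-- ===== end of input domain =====

-- B replaces A's three per-word number conversions by one fused column scan over the
-- padded words, Horner-accumulating the per-column difference d1+d2-d3 and testing it for zero
-- (alternative decomposition, same cost).

-- ===== PORT A =====
-- helper 'wordToNumber' of A: Horner accumulation over the characters
def wordToNumber (word : String) : Int :=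
  word.toList.foldl (fun number char => number * 10 + ((char.toNat : Int) - 97)) 0

def isSumEqual (firstWord : String) (secondWord : String) (targetWord : String) : Bool :=
  let num1 := wordToNumber firstWord
  let num2 := wordToNumber secondWord
  let targetNum := wordToNumber targetWord
  decide (num1 + num2 = targetNum)

-- ===== PORT B =====
-- helper 'digit' of B (n is the enclosing scope's common width): the i-th column digit of
-- word after left-padding with zeros to width n.  'word[j]' is ported as toList.getD:
-- exact here because every reachable index satisfies 0 ≤ j < len(word) (j ≥ 0 is tested,
-- and j = i - (n - len) < len since i < n in the only caller).
def altDigit (n : Int) (word : String) (i : Int) : Int :=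
  let j := i - (n - (word.toList.length : Int))
  if 0 ≤ j then ((word.toList.getD j.toNat ' ').toNat : Int) - 97 else 0

def isSumEqual_alt (firstWord : String) (secondWord : String) (targetWord : String) : Bool :=
  let n : Int := max (max (firstWord.toList.length : Int) (secondWord.toList.length : Int)) (targetWord.toList.length : Int)
  let acc := (PySem.List.pyRange 0 n 1).foldl
    (fun acc i => acc * 10 + altDigit n firstWord i + altDigit n secondWord i - altDigit n targetWord i) 0
  decide (acc = 0)

-- ===== PRECONDITION & SPEC =====
def Spec_isSumEqual (firstWord : String) (secondWord : String) (targetWord : String) (out : Bool) : Prop := out = isSumEqual_alt firstWord secondWord targetWord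
instance (firstWord : String) (secondWord : String) (targetWord : String) (out : Bool) : Decidable (Spec_isSumEqual firstWord secondWord targetWord out) := by unfold Spec_isSumEqual; infer_instance

-- ===== CLAIM (what is proved, stated in full; the proofs are below) =====
def Claim_equal_isSumEqual : Prop := ∀ (firstWord : String) (secondWord : String) (targetWord : String), Dom_isSumEqual firstWord secondWord targetWord → Spec_isSumEqual firstWord secondWord targetWord (isSumEqual firstWord secondWord targetWord)

-- ===== LEMMAS AND PROOFS =====

-- proof-side single-word Horner fold F g m = digits g Horner-accumulated over range m
def hornerF (g : Nat → Int) (m : Nat) : Int :=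
  (List.range m).foldl (fun a i => a * 10 + g i) 0

-- linearity of the fused fold: accumulating d1+d2-d3 is the three Horner folds combined
theorem fused_linear (g1 g2 g3 : Nat → Int) (m : Nat) :
    (List.range m).foldl (fun a i => a * 10 + g1 i + g2 i - g3 i) 0
      = hornerF g1 m + hornerF g2 m - hornerF g3 m := by
  induction m with
  | zero => simp [hornerF]
  | succ m ih =>
      simp only [hornerF, List.range_succ, List.foldl_append, List.foldl_cons, List.foldl_nil] at *
      rw [ih]; ring

-- pointwise-equal step functions fold identically (congruence helper)
theorem foldl_fun_congr {α β : Type} (l : List β) (f g : α → β → α) (a : α)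
    (h : ∀ a x, f a x = g a x) : l.foldl f a = l.foldl g a := by
  induction l generalizing a with
  | nil => rfl
  | cons x l ih => simp only [List.foldl_cons, h]; exact ih _

-- folding over indices with getD equals folding over the list itself
theorem foldl_range_getD (l : List Char) (f : Int → Char → Int) (a : Int) :
    (List.range l.length).foldl (fun a i => f a (l.getD i ' ')) a = l.foldl f a := by
  induction l generalizing a with
  | nil => simp
  | cons c l ih =>
      simp only [List.length_cons, List.range_succ_eq_map, List.foldl_cons, List.foldl_map,
        List.getD_cons_zero, List.getD_cons_succ]
      exact ih (f a c)

-- the padded-column Horner fold of one word is A's wordToNumber, for any width ≥ the word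
theorem hornerF_digit (w : String) (m : Nat) (h : w.toList.length ≤ m) :
    hornerF (fun i => altDigit (m : Int) w (i : Int)) m = wordToNumber w := by
  induction m with
  | zero =>
      have : w.toList = [] := List.eq_nil_of_length_eq_zero (Nat.le_zero.mp h)
      simp [hornerF, wordToNumber, this]
  | succ m ih =>
      rcases Nat.lt_or_ge w.toList.length (m + 1) with hlt | hge
      · -- word shorter than the width: column 0 is a padding zero, rest reduces to width m
        have hle : w.toList.length ≤ m := Nat.lt_succ_iff.mp hlt
        have h0 : altDigit ((m + 1 : Nat) : Int) w ((0 : Nat) : Int) = 0 := by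
          simp only [altDigit]
          rw [if_neg (by push_cast; omega)]
        have hshift : ∀ a : Int, ∀ i : Nat,
            a * 10 + altDigit ((m + 1 : Nat) : Int) w (((i + 1 : Nat)) : Int)
              = a * 10 + altDigit (m : Int) w ((i : Nat) : Int) := by
          intro a i
          simp only [altDigit]
          have hcond : (0 ≤ (((i + 1 : Nat)) : Int) - (((m + 1 : Nat) : Int) - (w.toList.length : Int)))
              ↔ (0 ≤ ((i : Nat) : Int) - ((m : Int) - (w.toList.length : Int))) := by
            push_cast; omega
          have hidx : ((((i + 1 : Nat)) : Int) - (((m + 1 : Nat) : Int) - (w.toList.length : Int))).toNat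
              = (((i : Nat) : Int) - ((m : Int) - (w.toList.length : Int))).toNat := by
            push_cast; omega
          by_cases hc : 0 ≤ ((i : Nat) : Int) - ((m : Int) - (w.toList.length : Int))
          · rw [if_pos (hcond.mpr hc), if_pos hc, hidx]
          · rw [if_neg (fun hx => hc (hcond.mp hx)), if_neg hc]
        simp only [hornerF, List.range_succ_eq_map, List.foldl_cons, List.foldl_map]
        rw [h0]
        rw [show (0 * 10 + 0 : Int) = 0 by ring]
        rw [foldl_fun_congr (List.range m) _ _ 0 (fun a i => hshift a i)]
        exact ih hle
      · -- word exactly the width: every column is a real character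
        have hlen : w.toList.length = m + 1 := le_antisymm h hge
        have hdig : ∀ a : Int, ∀ i : Nat,
            a * 10 + altDigit ((m + 1 : Nat) : Int) w ((i : Nat) : Int)
              = a * 10 + (((w.toList.getD i ' ').toNat : Int) - 97) := by
          intro a i
          simp only [altDigit, hlen]
          rw [if_pos (by push_cast; omega)]
          have : (((i : Nat) : Int) - (((m + 1 : Nat) : Int) - ((m + 1 : Nat) : Int))).toNat = i := by
            push_cast; omega
          rw [this]
        simp only [hornerF]
        rw [foldl_fun_congr (List.range (m + 1)) _ _ 0 (fun a i => hdig a i)]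
        rw [← hlen, foldl_range_getD w.toList (fun a c => a * 10 + ((c.toNat : Int) - 97)) 0]
        rfl

-- ===== VERDICT (by name: the statement is the Claim_ definition above) =====
theorem isSumEqual_spec : Claim_equal_isSumEqual := by
  intro f s t _
  unfold Spec_isSumEqual isSumEqual isSumEqual_alt
  dsimp only
  set n : Int := max (max (f.toList.length : Int) (s.toList.length : Int)) (t.toList.length : Int) with hn
  have hn0 : 0 ≤ n := le_trans (Int.natCast_nonneg _) (le_trans (le_max_left _ _) (le_max_left _ _))
  have hm : ((n.toNat : Nat) : Int) = n := Int.toNat_of_nonneg hn0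
  have hfI : (f.toList.length : Int) ≤ n := le_trans (le_max_left _ _) (le_max_left _ _)
  have hsI : (s.toList.length : Int) ≤ n := le_trans (le_max_right _ _) (le_max_left _ _)
  have htI : (t.toList.length : Int) ≤ n := le_max_right _ _
  have key : ∀ w : String, (w.toList.length : Int) ≤ n →
      hornerF (fun i => altDigit n w (i : Int)) n.toNat = wordToNumber w := by
    intro w hw
    have hle : w.toList.length ≤ n.toNat := by omega
    have := hornerF_digit w n.toNat hle
    rwa [hm] at this
  rw [PySem.List.pyRange_one]
  simp only [List.foldl_map, zero_add, sub_zero]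
  rw [fused_linear (fun k => altDigit n f (k : Int)) (fun k => altDigit n s (k : Int))
        (fun k => altDigit n t (k : Int)) n.toNat]
  rw [key f hfI, key s hsI, key t htI]
  simp only [decide_eq_decide]
  omega
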